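-- pv_equiv track=rewrite | github.com/wzmw-zr/Code-Archive | 2020/11/20/4.case.py | dfs
-- ===== SOURCE A (Python) =====
-- def dfs(str_list: list, ind: int, string: str, target: str) -> int:
--     if ind == len(str_list):
--         return 0
--     if len(string) > len(target):
--         return 0
--     if string not in target:
--         return 0
--     if string == target:
--         return 1
--     cnt = 0
--     for i in range(ind, len(str_list)):
--         cnt += dfs(str_list, i + 1, string + str_list[i], target)
--     return cnt
-- ===== SOURCE B (Python) =====
-- def dfs(str_list: list, ind: int, string: str, target: str) -> int:
--     if not target.startswith(string):
--         return 0
--     n, m = len(str_list), len(target)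
--     memo = {}
--
--     def count(i: int, pos: int) -> int:
--         if i == n:
--             return 0
--         if pos == m:
--             return 1
--         if (i, pos) not in memo:
--             total = 0
--             for j in range(i, n):
--                 w = str_list[j]
--                 if target[pos:pos + len(w)] == w:
--                     total += count(j + 1, pos + len(w))
--             memo[(i, pos)] = total
--         return memo[(i, pos)]
--
--     return count(ind, len(string))
-- ===== Notes on version B (the rewrite author's own statement) =====
-- stated objective: alternative
-- what changed: A's recursion over (next index, accumulated string) with substring pruning is replaced by a prefix check plus a memoized count over (list index, target position) states, so no intermediate strings are built and each state is computed once; Pre_ excludes only the inputs on which A raises IndexError (ind below -len(str_list) with the recursion's loop reached).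
import Mathlib
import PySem

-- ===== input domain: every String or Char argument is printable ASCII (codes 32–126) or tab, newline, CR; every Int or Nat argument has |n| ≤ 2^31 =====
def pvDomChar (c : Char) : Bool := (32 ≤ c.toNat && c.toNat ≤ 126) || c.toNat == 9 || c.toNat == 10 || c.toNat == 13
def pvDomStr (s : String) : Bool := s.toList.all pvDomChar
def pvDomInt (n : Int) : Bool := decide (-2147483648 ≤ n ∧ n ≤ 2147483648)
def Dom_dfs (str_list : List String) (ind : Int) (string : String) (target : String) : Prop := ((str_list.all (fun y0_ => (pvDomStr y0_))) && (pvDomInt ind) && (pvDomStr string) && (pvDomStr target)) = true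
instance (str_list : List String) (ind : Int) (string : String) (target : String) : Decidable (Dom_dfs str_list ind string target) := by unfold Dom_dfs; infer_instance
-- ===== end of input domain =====

-- B replaces A's recursion over accumulated strings by dynamic programming: a prefix check
-- plus a memoized count over (list index, target position) states (objective: alternative).

-- ===== PORT A =====
-- A recurses over every choice of next list index, concatenating strings; the for-loop is
-- ported as the helper recursion dfsLoop over the running index j with accumulator cnt.
mutual
def dfs (str_list : List String) (ind : Int) (string : String) (target : String) : Int :=
  if ind = PySem.List.len str_list then 0
  else if PySem.Str.len string > PySem.Str.len target then 0
  else if PySem.Str.isIn string target = false then 0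
  else if string = target then 1
  else dfsLoop str_list target string ind 0
termination_by 2 * ((PySem.List.len str_list) - ind).toNat + 1
decreasing_by all_goals (simp only [PySem.List.len] at *; omega)

def dfsLoop (str_list : List String) (target : String) (string : String) (j : Int) (cnt : Int) : Int :=
  if j < PySem.List.len str_list then
    dfsLoop str_list target string (j + 1)
      (cnt + dfs str_list (j + 1) (string ++ (PySem.List.pyGet? str_list j).getD "") target)
  else cnt
termination_by 2 * ((PySem.List.len str_list) - j).toNat
decreasing_by all_goals (simp only [PySem.List.len] at *; omega)
end

-- ===== PORT B =====
-- B's inner memoized recursion `count` (countB) with its for-loop as helper loopB,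
-- threading the memo dict through the computation.
mutual
def countB (L : List String) (T : String) (memo : PySem.Dict (Int × Int) Int) (i : Int) (pos : Int) :
    PySem.Dict (Int × Int) Int × Int :=
  if i = PySem.List.len L then (memo, 0)
  else if pos = PySem.Str.len T then (memo, 1)
  else if memo.contains (i, pos) = false then
    let r := loopB L T memo 0 i pos
    let memo' := r.1.insert (i, pos) r.2
    (memo', memo'.getD (i, pos) 0)
  else (memo, memo.getD (i, pos) 0)
termination_by 2 * ((PySem.List.len L) - i).toNat + 1
decreasing_by all_goals (simp only [PySem.List.len] at *; omega)

def loopB (L : List String) (T : String) (memo : PySem.Dict (Int × Int) Int) (total : Int) (j : Int) (pos : Int) :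
    PySem.Dict (Int × Int) Int × Int :=
  if j < PySem.List.len L then
    let w := (PySem.List.pyGet? L j).getD ""
    if PySem.Str.slice T (some pos) (some (pos + PySem.Str.len w)) = w then
      let c := countB L T memo (j + 1) (pos + PySem.Str.len w)
      loopB L T c.1 (total + c.2) (j + 1) pos
    else loopB L T memo total (j + 1) pos
  else (memo, total)
termination_by 2 * ((PySem.List.len L) - j).toNat
decreasing_by all_goals
  (simp only [PySem.List.len]
   first
    | omega
    | (have hj : j < ((L.length : Nat) : Int) := by
         simpa only [PySem.List.len] using ‹j < PySem.List.len L›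
       omega))
end

def dfs_alt (str_list : List String) (ind : Int) (string : String) (target : String) : Int :=
  if PySem.Str.startswith target string = false then 0
  else (countB str_list target PySem.Dict.empty ind (PySem.Str.len string)).2

-- ===== PRECONDITION & SPEC =====
-- Pre_ excludes exactly the inputs on which A raises IndexError (ind below -len(str_list)
-- while the recursive loop is reached); A returns a value on every other input.
def Pre_dfs (str_list : List String) (ind : Int) (string : String) (target : String) : Prop :=
  ¬ (ind < -(PySem.List.len str_list) ∧ PySem.Str.len string ≤ PySem.Str.len target ∧
     PySem.Str.isIn string target = true ∧ string ≠ target)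
instance (str_list : List String) (ind : Int) (string : String) (target : String) : Decidable (Pre_dfs str_list ind string target) := by unfold Pre_dfs; infer_instance
def pvWitness_dfs : List String × Int × String × String := (["a", "b", "c"], 0, "", "abc")

def Spec_dfs (str_list : List String) (ind : Int) (string : String) (target : String) (out : Int) : Prop := out = dfs_alt str_list ind string target
instance (str_list : List String) (ind : Int) (string : String) (target : String) (out : Int) : Decidable (Spec_dfs str_list ind string target out) := by unfold Spec_dfs; infer_instance

-- ===== CLAIM (what is proved, stated in full; the proofs are below) =====
def Claim_equal_dfs : Prop := ∀ (str_list : List String) (ind : Int) (string : String) (target : String), Dom_dfs str_list ind string target → Pre_dfs str_list ind string target → Spec_dfs str_list ind string target (dfs str_list ind string target)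

-- ===== LEMMAS AND PROOFS =====

-- Pure (memo-free) value of B's count recursion: the common specification both ports meet.
mutual
def Pv (L : List String) (T : String) (i : Int) (pos : Int) : Int :=
  if i = PySem.List.len L then 0
  else if pos = PySem.Str.len T then 1
  else Ploop L T 0 i pos
termination_by 2 * ((PySem.List.len L) - i).toNat + 1
decreasing_by all_goals (simp only [PySem.List.len] at *; omega)

def Ploop (L : List String) (T : String) (total : Int) (j : Int) (pos : Int) : Int :=
  if j < PySem.List.len L then
    let w := (PySem.List.pyGet? L j).getD ""
    if PySem.Str.slice T (some pos) (some (pos + PySem.Str.len w)) = w then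
      Ploop L T (total + Pv L T (j + 1) (pos + PySem.Str.len w)) (j + 1) pos
    else Ploop L T total (j + 1) pos
  else total
termination_by 2 * ((PySem.List.len L) - j).toNat
decreasing_by all_goals (simp only [PySem.List.len] at *; omega)
end

-- memo invariant: every stored value is the pure count of its state
def InvB (L : List String) (T : String) (memo : PySem.Dict (Int × Int) Int) : Prop :=
  ∀ a b v, memo.get? (a, b) = some v → v = Pv L T a b

theorem B_main (L : List String) (T : String) (N : Nat) :
    (∀ i pos memo, InvB L T memo → 2 * ((PySem.List.len L) - i).toNat + 1 ≤ N →
      (countB L T memo i pos).2 = Pv L T i pos ∧ InvB L T (countB L T memo i pos).1) ∧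
    (∀ j pos total memo, InvB L T memo → 2 * ((PySem.List.len L) - j).toNat ≤ N →
      (loopB L T memo total j pos).2 = Ploop L T total j pos ∧
        InvB L T (loopB L T memo total j pos).1) := by
  induction N with
  | zero =>
    constructor
    · intro i pos memo _ hle; omega
    · intro j pos total memo hInv hle
      have hj : ¬ j < PySem.List.len L := by simp only [PySem.List.len] at *; omega
      rw [loopB, Ploop]
      rw [if_neg hj, if_neg hj]
      exact ⟨rfl, hInv⟩
  | succ N ih =>
    obtain ⟨ihC, ihL⟩ := ih
    constructor
    · intro i pos memo hInv hle
      rw [countB, Pv]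
      split_ifs with h1 h2 h3
      · exact ⟨rfl, hInv⟩
      · exact ⟨rfl, hInv⟩
      · have hmeas : 2 * ((PySem.List.len L) - i).toNat ≤ N := by omega
        obtain ⟨hr2, hrInv⟩ := ihL i pos 0 memo hInv hmeas
        refine ⟨?_, ?_⟩
        · show ((loopB L T memo 0 i pos).1.insert (i, pos)
              (loopB L T memo 0 i pos).2).getD (i, pos) 0 = Ploop L T 0 i pos
          rw [PySem.Dict.getD_insert_self, hr2]
        · intro a b v hv
          show v = Pv L T a b
          rw [PySem.Dict.get?_insert] at hv
          by_cases hab : (a, b) = (i, pos)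
          · rw [if_pos hab] at hv
            obtain ⟨rfl, rfl⟩ := Prod.mk.injEq .. ▸ hab
            simp only [Option.some.injEq] at hv
            rw [← hv, hr2, Pv, if_neg h1, if_neg h2]
          · rw [if_neg hab] at hv
            exact hrInv a b v hv
      · have hc : memo.contains (i, pos) = true := by
          cases h : memo.contains (i, pos) with
          | false => exact absurd h h3
          | true => rfl
        obtain ⟨v, hv⟩ : ∃ v, memo.get? (i, pos) = some v := by
          rw [PySem.Dict.contains_eq_isSome_get?] at hc
          exact Option.isSome_iff_exists.mp hc
        refine ⟨?_, hInv⟩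
        show memo.getD (i, pos) 0 = Ploop L T 0 i pos
        rw [PySem.Dict.getD_eq_get?_getD, hv]
        have := hInv i pos v hv
        simp only [Option.getD_some, this]
        rw [Pv, if_neg h1, if_neg h2]
    · intro j pos total memo hInv hle
      rw [loopB, Ploop]
      dsimp only
      split_ifs with hj hm
      · have hm1 : 2 * ((PySem.List.len L) - (j + 1)).toNat + 1 ≤ N := by
          simp only [PySem.List.len] at *; omega
        have hm2 : 2 * ((PySem.List.len L) - (j + 1)).toNat ≤ N := by
          simp only [PySem.List.len] at *; omega
        obtain ⟨hc2, hcInv⟩ := ihC (j + 1)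
          (pos + PySem.Str.len ((PySem.List.pyGet? L j).getD "")) memo hInv hm1
        obtain ⟨hl2, hlInv⟩ := ihL (j + 1) pos
          (total + (countB L T memo (j + 1)
            (pos + PySem.Str.len ((PySem.List.pyGet? L j).getD ""))).2)
          (countB L T memo (j + 1)
            (pos + PySem.Str.len ((PySem.List.pyGet? L j).getD ""))).1 hcInv hm2
        exact ⟨by rw [hl2, hc2], hlInv⟩
      · have hm2 : 2 * ((PySem.List.len L) - (j + 1)).toNat ≤ N := by
          simp only [PySem.List.len] at *; omega
        exact ihL (j + 1) pos total memo hInv hm2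
      · exact ⟨rfl, hInv⟩

theorem countB_empty (L : List String) (T : String) (i pos : Int) :
    (countB L T PySem.Dict.empty i pos).2 = Pv L T i pos := by
  have hInv : InvB L T PySem.Dict.empty := by
    intro a b v hv
    rw [PySem.Dict.get?_empty] at hv
    exact absurd hv (by simp)
  exact ((B_main L T (2 * ((PySem.List.len L) - i).toNat + 1)).1 i pos
    PySem.Dict.empty hInv (le_refl _)).1

-- the slice test in the position DP is exactly "the extended string is still a prefix of target"
theorem match_iff (T s w : String) (hs : s.toList <+: T.toList) :
    PySem.Str.slice T (some ((s.toList.length : Int)))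
        (some (((s.toList.length : Int)) + PySem.Str.len w)) = w ↔
      s.toList ++ w.toList <+: T.toList := by
  have h1 : (PySem.Str.slice T (some ((s.toList.length : Int)))
      (some (((s.toList.length : Int)) + PySem.Str.len w))).toList
      = (T.toList.drop s.toList.length).take w.toList.length := by
    simp [pysem]
  have hT : T.toList = s.toList ++ T.toList.drop s.toList.length := by
    conv_lhs => rw [← List.take_append_drop s.toList.length T.toList]
    rw [← List.prefix_iff_eq_take.mp hs]
  constructor
  · intro h
    have h2 : (T.toList.drop s.toList.length).take w.toList.length = w.toList := by
      rw [← h1, h]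
    have hw : w.toList <+: T.toList.drop s.toList.length := h2 ▸ List.take_prefix _ _
    rw [hT]
    exact (List.prefix_append_right_inj _).mpr hw
  · intro h
    have hw : w.toList <+: T.toList.drop s.toList.length := by
      rw [hT] at h
      exact (List.prefix_append_right_inj _).mp h
    have h2 : (T.toList.drop s.toList.length).take w.toList.length = w.toList :=
      (List.prefix_iff_eq_take.mp hw).symm
    apply String.toList_inj.mp
    rw [h1, h2]

theorem len_toList (s : String) : PySem.Str.len s = ((s.toList.length : Nat) : Int) := by
  simp [pysem]

theorem A_main (L : List String) (T : String) (N : Nat) :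
    (∀ i (s : String), 2 * ((PySem.List.len L) - i).toNat + 1 ≤ N →
      dfs L i s T = if s.toList <+: T.toList then Pv L T i ((s.toList.length : Int)) else 0) ∧
    (∀ j (s : String) cnt, s.toList <+: T.toList → 2 * ((PySem.List.len L) - j).toNat ≤ N →
      dfsLoop L T s j cnt = Ploop L T cnt j ((s.toList.length : Int))) ∧
    (∀ j (s : String) cnt, ¬ s.toList <+: T.toList → 2 * ((PySem.List.len L) - j).toNat ≤ N →
      dfsLoop L T s j cnt = cnt) := by
  induction N with
  | zero =>
    refine ⟨fun i s hle => by omega, fun j s cnt _ hle => ?_, fun j s cnt _ hle => ?_⟩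
    all_goals
      have hj : ¬ j < PySem.List.len L := by simp only [PySem.List.len] at *; omega
    · rw [dfsLoop, Ploop]
      rw [if_neg hj, if_neg hj]
    · rw [dfsLoop, if_neg hj]
  | succ N ih =>
    obtain ⟨ihA, ihLp, ihLn⟩ := ih
    refine ⟨?_, ?_, ?_⟩
    · intro i s hle
      by_cases hp : s.toList <+: T.toList
      · rw [if_pos hp, dfs]
        split_ifs with h1 h2 h3 h4
        · rw [Pv, if_pos h1]
        · exfalso
          rw [len_toList, len_toList] at h2
          have := hp.length_le
          omega
        · exfalso
          rw [PySem.Str.isIn_eq] at h3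
          exact absurd ((PySem.Chars.isIn_iff_infix _ _).mpr hp.isInfix) (by simp [h3])
        · subst h4
          rw [Pv, if_neg h1, if_pos (by rw [len_toList])]
        · have hle' : 2 * ((PySem.List.len L) - i).toNat ≤ N := by omega
          rw [ihLp i s 0 hp hle']
          have hpos : ¬ ((s.toList.length : Int) = PySem.Str.len T) := by
            intro hlen
            rw [len_toList] at hlen
            have : s.toList = T.toList := hp.eq_of_length (by exact_mod_cast hlen)
            exact h4 (String.toList_inj.mp this)
          rw [Pv, if_neg h1, if_neg hpos]
      · rw [if_neg hp, dfs]
        split_ifs with h1 h2 h3 h4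
        · rfl
        · rfl
        · rfl
        · exact absurd (h4 ▸ List.prefix_refl s.toList) hp
        · have hle' : 2 * ((PySem.List.len L) - i).toNat ≤ N := by omega
          exact ihLn i s 0 hp hle'
    · intro j s cnt hp hle
      rw [dfsLoop, Ploop]
      dsimp only
      by_cases hj : j < PySem.List.len L
      · rw [if_pos hj, if_pos hj]
        have hle1 : 2 * ((PySem.List.len L) - (j + 1)).toNat + 1 ≤ N := by
          simp only [PySem.List.len] at hj hle ⊢; omega
        have hle2 : 2 * ((PySem.List.len L) - (j + 1)).toNat ≤ N := by omega
        have hd := ihA (j + 1) (s ++ (PySem.List.pyGet? L j).getD "") hle1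
        rw [String.toList_append] at hd
        have hcast : ((s.toList.length : Nat) : Int) +
            PySem.Str.len ((PySem.List.pyGet? L j).getD "") =
            (((s.toList ++ ((PySem.List.pyGet? L j).getD "" : String).toList).length : Nat) : Int) := by
          rw [len_toList, List.length_append]
          push_cast
          ring
        by_cases hm : s.toList ++ ((PySem.List.pyGet? L j).getD "" : String).toList <+: T.toList
        · rw [if_pos ((match_iff T s _ hp).mpr hm)]
          rw [if_pos hm] at hd
          rw [hd, ihLp (j + 1) s _ hp hle2, hcast]
        · rw [if_neg (fun h => hm ((match_iff T s _ hp).mp h))]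
          rw [if_neg hm] at hd
          rw [hd, add_zero, ihLp (j + 1) s cnt hp hle2]
      · rw [if_neg hj, if_neg hj]
    · intro j s cnt hp hle
      rw [dfsLoop]
      by_cases hj : j < PySem.List.len L
      · rw [if_pos hj]
        have hle1 : 2 * ((PySem.List.len L) - (j + 1)).toNat + 1 ≤ N := by
          simp only [PySem.List.len] at hj hle ⊢; omega
        have hle2 : 2 * ((PySem.List.len L) - (j + 1)).toNat ≤ N := by omega
        have hd := ihA (j + 1) (s ++ (PySem.List.pyGet? L j).getD "") hle1
        rw [String.toList_append] at hd
        have hnp : ¬ (s.toList ++ ((PySem.List.pyGet? L j).getD "" : String).toList <+: T.toList) :=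
          fun h => hp ((List.prefix_append s.toList _).trans h)
        rw [if_neg hnp] at hd
        rw [hd, add_zero]
        exact ihLn (j + 1) s cnt hp hle2
      · rw [if_neg hj]

-- ===== VERDICT (by name: the statement is the Claim_ definition above) =====
theorem dfs_spec : Claim_equal_dfs := by
  intro L i s T _ _
  show dfs L i s T = dfs_alt L i s T
  rw [dfs_alt]
  have hA := (A_main L T (2 * ((PySem.List.len L) - i).toNat + 1)).1 i s (le_refl _)
  by_cases hp : s.toList <+: T.toList
  · have hsw : PySem.Str.startswith T s = true := by
      rw [PySem.Str.startswith_eq]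
      exact (PySem.Chars.startswith_iff _ _).mpr hp
    rw [if_neg (by rw [PySem.Str.startswith_eq] at hsw; simp [hsw]), countB_empty, hA,
      if_pos hp, len_toList]
  · have hsw : PySem.Str.startswith T s = false := by
      cases h : PySem.Str.startswith T s with
      | false => rfl
      | true =>
        rw [PySem.Str.startswith_eq] at h
        exact absurd ((PySem.Chars.startswith_iff _ _).mp h) hp
    rw [if_pos hsw, hA, if_neg hp]
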